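-- pv_equiv track=rewrite | github.com/skyzer/gold-digger | scripts/lib/narratives.py | _parse_narratives
-- ===== SOURCE A (Python) =====
-- from typing import Any, Dict, List, Optional
--
-- def _parse_narratives(text: str) -> Dict[str, Dict[str, List[str]]]:
--     """Parse the narratives.md markdown into a dict of tag → {keywords, seeds}."""
--     result: Dict[str, Dict[str, List[str]]] = {}
--     current_tag: Optional[str] = None
--     for raw in text.splitlines():
--         line = raw.strip()
--         # Section header: `## tag-name`
--         if line.startswith("## "):
--             tag = line[3:].strip().lower().replace(" ", "-")
--             # Skip non-narrative sections like "Adding a narrative"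
--             if not tag or " " in tag or tag in ("adding-a-narrative",):
--                 current_tag = None
--                 continue
--             current_tag = tag
--             result[tag] = {"keywords": [], "seeds": []}
--             continue
--         if current_tag is None:
--             continue
--         # Keyword / seed lines
--         if line.lower().startswith("**keywords:**"):
--             body = line.split(":", 1)[1].strip().lstrip("*").strip()
--             kws = [k.strip().lower() for k in body.split(",") if k.strip()]
--             result[current_tag]["keywords"] = kws
--         elif line.lower().startswith("**seeds:**"):
--             body = line.split(":", 1)[1].strip().lstrip("*").strip()
--             seeds = [s.strip().lower() for s in body.split(",") if s.strip()]
--             result[current_tag]["seeds"] = seeds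
--     return result
-- ===== SOURCE B (Python) =====
-- from typing import Dict, List, Tuple
--
-- def _split_sections(text: str):
--     """First pass: group the lines into (header-line, body-lines) sections;
--     lines before the first '## ' header are dropped."""
--     sections: List[Tuple[str, List[str]]] = []
--     header = None
--     body: List[str] = []
--     for raw in text.splitlines():
--         if raw.strip().startswith("## "):
--             if header is not None:
--                 sections.append((header, body))
--             header, body = raw, []
--         elif header is not None:
--             body.append(raw)
--     if header is not None:
--         sections.append((header, body))
--     return sections
--
-- def _items(line: str) -> List[str]:
--     body = line.split(":", 1)[1].strip().lstrip("*").strip()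
--     return [p.strip().lower() for p in body.split(",") if p.strip()]
--
-- def _parse_narratives(text: str) -> Dict[str, Dict[str, List[str]]]:
--     """Parse the narratives.md markdown into a dict of tag → {keywords, seeds}."""
--     result: Dict[str, Dict[str, List[str]]] = {}
--     for header, body in _split_sections(text):
--         tag = header.strip()[3:].strip().lower().replace(" ", "-")
--         if not tag or " " in tag or tag in ("adding-a-narrative",):
--             continue
--         entry: Dict[str, List[str]] = {"keywords": [], "seeds": []}
--         for raw in body:
--             line = raw.strip()
--             low = line.lower()
--             if low.startswith("**keywords:**"):
--                 entry["keywords"] = _items(line)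
--             elif low.startswith("**seeds:**"):
--                 entry["seeds"] = _items(line)
--         result[tag] = entry
--     return result
-- ===== Notes on version B (the rewrite author's own statement) =====
-- stated objective: alternative
-- what changed: Replaces A's single stateful line loop (current_tag threaded through a dict mutated in place) by a two-pass decomposition: first group the lines into (header, body-lines) sections, then process each section independently into its tag entry.
import Mathlib
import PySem

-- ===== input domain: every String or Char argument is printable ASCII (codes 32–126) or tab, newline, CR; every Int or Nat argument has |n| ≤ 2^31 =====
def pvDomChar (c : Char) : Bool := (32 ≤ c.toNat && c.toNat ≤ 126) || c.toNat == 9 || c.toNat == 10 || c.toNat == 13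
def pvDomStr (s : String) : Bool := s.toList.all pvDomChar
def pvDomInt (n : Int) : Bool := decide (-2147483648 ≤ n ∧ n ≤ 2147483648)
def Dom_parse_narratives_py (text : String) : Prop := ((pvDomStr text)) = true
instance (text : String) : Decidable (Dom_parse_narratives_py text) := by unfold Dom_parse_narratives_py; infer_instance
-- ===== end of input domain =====

-- B replaces A's single stateful line loop by a two-pass decomposition (group lines into
-- (header, body) sections, then process each section independently); same cost, 'alternative'.

abbrev PD2 : Type := PySem.Dict String (List String)
abbrev PD1 : Type := PySem.Dict String PD2

-- hand port of Python's s.lstrip("*") (drop leading '*' characters); exact: lstrip with an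
-- explicit chars argument is not in PySem, and dropWhile on the code points is its meaning.
def pvLstripStar (s : String) : String := String.ofList (s.toList.dropWhile (fun c => c == '*'))

-- ===== PORT A =====
-- loop body of A's `for raw in text.splitlines()` with state (result, current_tag);
-- `result[current_tag][...] = v` is ported as Dict.modify (the key is always present when
-- current_tag is set, so the unused default Dict.empty never shows); `line.split(":",1)[1]`
-- never raises here (the startswith guard forces a ':'), so the total getD forms are exact.
def pvStepA (st : PD1 × Option String) (raw : String) : PD1 × Option String :=
  let line := PySem.Str.strip raw
  if PySem.Str.startswith line "## " then
    let tag := PySem.Str.replace (PySem.Str.lower (PySem.Str.strip (PySem.Str.slice line (some 3) none))) " " "-"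
    if tag == "" || PySem.Str.isIn " " tag || tag == "adding-a-narrative" then (st.1, none)
    else ((st.1).insert tag (PySem.Dict.ofList [("keywords", ([] : List String)), ("seeds", [])]), some tag)
  else
    match st.2 with
    | none => (st.1, none)
    | some t =>
      if PySem.Str.startswith (PySem.Str.lower line) "**keywords:**" then
        let body := PySem.Str.strip (pvLstripStar (PySem.Str.strip (PySem.List.pyGetD ((PySem.Str.splitMax? line ":" 1).getD []) 1 "")))
        let kws := (((PySem.Str.split? body ",").getD []).filter (fun p => PySem.Str.strip p != "")).map (fun p => PySem.Str.lower (PySem.Str.strip p))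
        ((st.1).modify t PySem.Dict.empty (fun inner => inner.insert "keywords" kws), some t)
      else if PySem.Str.startswith (PySem.Str.lower line) "**seeds:**" then
        let body := PySem.Str.strip (pvLstripStar (PySem.Str.strip (PySem.List.pyGetD ((PySem.Str.splitMax? line ":" 1).getD []) 1 "")))
        let seeds := (((PySem.Str.split? body ",").getD []).filter (fun p => PySem.Str.strip p != "")).map (fun p => PySem.Str.lower (PySem.Str.strip p))
        ((st.1).modify t PySem.Dict.empty (fun inner => inner.insert "seeds" seeds), some t)
      else (st.1, some t)

def parse_narratives_py (text : String) : List (String × List (String × List String)) :=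
  (((PySem.Str.splitlines text).foldl pvStepA (PySem.Dict.empty, none)).1.items).map
    (fun p => (p.1, p.2.items))

-- ===== PORT B =====
-- B's helper _items(line)
def pvItems (line : String) : List String :=
  let body := PySem.Str.strip (pvLstripStar (PySem.Str.strip (PySem.List.pyGetD ((PySem.Str.splitMax? line ":" 1).getD []) 1 "")))
  (((PySem.Str.split? body ",").getD []).filter (fun p => PySem.Str.strip p != "")).map (fun p => PySem.Str.lower (PySem.Str.strip p))

-- first pass: loop body of B's _split_sections, state (finished sections, current (header, body))
def pvStep1 (st : List (String × List String) × Option (String × List String)) (raw : String) :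
    List (String × List String) × Option (String × List String) :=
  if PySem.Str.startswith (PySem.Str.strip raw) "## " then
    (st.1 ++ (match st.2 with | some sec => [sec] | none => []), some (raw, []))
  else
    match st.2 with
    | some sec => (st.1, some (sec.1, sec.2 ++ [raw]))
    | none => st

def pvSplitSections (text : String) : List (String × List String) :=
  ((PySem.Str.splitlines text).foldl pvStep1 ([], none)).1
    ++ (match ((PySem.Str.splitlines text).foldl pvStep1 ([], none)).2 with
        | some sec => [sec] | none => [])

-- body-line step of B's per-section entry loop
def pvEntStep (entry : PD2) (raw : String) : PD2 :=
  let line := PySem.Str.strip raw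
  if PySem.Str.startswith (PySem.Str.lower line) "**keywords:**" then entry.insert "keywords" (pvItems line)
  else if PySem.Str.startswith (PySem.Str.lower line) "**seeds:**" then entry.insert "seeds" (pvItems line)
  else entry

-- second pass: fold one section into the result dict
def pvStepB (result : PD1) (sec : String × List String) : PD1 :=
  let tag := PySem.Str.replace (PySem.Str.lower (PySem.Str.strip (PySem.Str.slice (PySem.Str.strip sec.1) (some 3) none))) " " "-"
  if tag == "" || PySem.Str.isIn " " tag || tag == "adding-a-narrative" then result
  else result.insert tag (sec.2.foldl pvEntStep (PySem.Dict.ofList [("keywords", ([] : List String)), ("seeds", [])]))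

def parse_narratives_py_alt (text : String) : List (String × List (String × List String)) :=
  (((pvSplitSections text).foldl pvStepB PySem.Dict.empty).items).map
    (fun p => (p.1, p.2.items))

-- ===== PRECONDITION & SPEC =====
def Spec_parse_narratives_py (text : String) (out : List (String × List (String × List String))) : Prop := out = parse_narratives_py_alt text
instance (text : String) (out : List (String × List (String × List String))) : Decidable (Spec_parse_narratives_py text out) := by unfold Spec_parse_narratives_py; infer_instance

-- ===== CLAIM (what is proved, stated in full; the proofs are below) =====
def Claim_equal_parse_narratives_py : Prop := ∀ (text : String), Dom_parse_narratives_py text → Spec_parse_narratives_py text (parse_narratives_py text)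

-- ===== LEMMAS AND PROOFS =====

def pvHdr (raw : String) : Bool := PySem.Str.startswith (PySem.Str.strip raw) "## "
def pvTag (raw : String) : String :=
  PySem.Str.replace (PySem.Str.lower (PySem.Str.strip (PySem.Str.slice (PySem.Str.strip raw) (some 3) none))) " " "-"
def pvBad (t : String) : Bool := t == "" || PySem.Str.isIn " " t || t == "adding-a-narrative"
def pvFresh : PD2 := PySem.Dict.ofList [("keywords", []), ("seeds", [])]
def pvEnt (body : List String) : PD2 := body.foldl pvEntStep pvFresh
def pvOpt (o : Option (String × List String)) : List (String × List String) :=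
  match o with | some sec => [sec] | none => []

-- the sections that B's first pass will still emit, as a structural recursion
def pvSecs (cur : Option (String × List String)) : List String → List (String × List String)
  | [] => pvOpt cur
  | raw :: rest =>
    if pvHdr raw then pvOpt cur ++ pvSecs (some (raw, [])) rest
    else match cur with
         | some sec => pvSecs (some (sec.1, sec.2 ++ [raw])) rest
         | none => pvSecs none rest

lemma secs_hdr (cur : Option (String × List String)) (raw : String) (rest : List String)
    (h : pvHdr raw = true) :
    pvSecs cur (raw :: rest) = pvOpt cur ++ pvSecs (some (raw, [])) rest := by
  simp only [pvSecs]; rw [h]; simp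

lemma secs_none (raw : String) (rest : List String) (h : pvHdr raw = false) :
    pvSecs none (raw :: rest) = pvSecs none rest := by
  simp only [pvSecs]; rw [h]; simp

lemma secs_body (sec : String × List String) (raw : String) (rest : List String)
    (h : pvHdr raw = false) :
    pvSecs (some sec) (raw :: rest) = pvSecs (some (sec.1, sec.2 ++ [raw])) rest := by
  simp only [pvSecs]; rw [h]; simp

-- B's first-pass step, characterized
lemma step1_hdr (done : List (String × List String)) (cur : Option (String × List String))
    (raw : String) (h : pvHdr raw = true) :
    pvStep1 (done, cur) raw = (done ++ pvOpt cur, some (raw, [])) := by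
  unfold pvHdr at h; simp only [pvStep1]; rw [h]; cases cur <;> rfl

lemma step1_none (done : List (String × List String)) (raw : String) (h : pvHdr raw = false) :
    pvStep1 (done, none) raw = (done, none) := by
  unfold pvHdr at h; simp only [pvStep1]; rw [h]; rfl

lemma step1_body (done : List (String × List String)) (sec : String × List String)
    (raw : String) (h : pvHdr raw = false) :
    pvStep1 (done, some sec) raw = (done, some (sec.1, sec.2 ++ [raw])) := by
  unfold pvHdr at h; simp only [pvStep1]; rw [h]; rfl

lemma pass1_eq (lines : List String) : ∀ (done : List (String × List String)) cur,
    (lines.foldl pvStep1 (done, cur)).1 ++ pvOpt (lines.foldl pvStep1 (done, cur)).2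
      = done ++ pvSecs cur lines := by
  induction lines with
  | nil => intro done cur; simp [pvSecs]
  | cons raw rest ih =>
    intro done cur
    rw [List.foldl_cons]
    cases h : pvHdr raw with
    | true =>
      rw [step1_hdr _ _ _ h, secs_hdr _ _ _ h, ih, List.append_assoc]
    | false =>
      cases cur with
      | none => rw [step1_none _ _ h, secs_none _ _ h, ih]
      | some sec => rw [step1_body _ _ _ h, secs_body _ _ _ h, ih]

lemma sections_eq (text : String) :
    pvSplitSections text = pvSecs none (PySem.Str.splitlines text) := by
  have := pass1_eq (PySem.Str.splitlines text) [] none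
  simpa [pvSplitSections, pvOpt] using this

-- the A-state that corresponds to a pending section `cur` over base dict d
def pvStA (cur : Option (String × List String)) (d : PD1) : PD1 × Option String :=
  match cur with
  | none => (d, none)
  | some sec =>
    if pvBad (pvTag sec.1) then (d, none)
    else (d.insert (pvTag sec.1) (pvEnt sec.2), some (pvTag sec.1))

-- B's section step, characterized
lemma stepB_char (d : PD1) (sec : String × List String) :
    pvStepB d sec = if pvBad (pvTag sec.1) then d else d.insert (pvTag sec.1) (pvEnt sec.2) := rfl

-- A's step on a header line
lemma stepA_hdr (d : PD1) (o : Option String) (raw : String) (h : pvHdr raw = true) :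
    pvStepA (d, o) raw
      = if pvBad (pvTag raw) then (d, none)
        else (d.insert (pvTag raw) pvFresh, some (pvTag raw)) := by
  unfold pvHdr at h
  simp at h
  simp [pvStepA, pvTag, pvBad, pvFresh, h]

-- A's step on a non-header line with no current tag
lemma stepA_none (d : PD1) (raw : String) (h : pvHdr raw = false) :
    pvStepA (d, none) raw = (d, none) := by
  unfold pvHdr at h
  simp at h
  simp [pvStepA, h]

-- A's step on a non-header body line mutates exactly the current entry
lemma stepA_body (d : PD1) (t : String) (e : PD2) (raw : String) (h : pvHdr raw = false) :
    pvStepA (d.insert t e, some t) raw = (d.insert t (pvEntStep e raw), some t) := by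
  unfold pvHdr at h
  simp at h
  by_cases h1 : PySem.Str.startswith (PySem.Str.lower (PySem.Str.strip raw)) "**keywords:**" = true
  all_goals simp at h1
  · simp [pvStepA, pvEntStep, pvItems, h, h1,
      PySem.Dict.modify, PySem.Dict.getD_insert_self, PySem.Dict.insert_insert_self]
  · by_cases h2 : PySem.Str.startswith (PySem.Str.lower (PySem.Str.strip raw)) "**seeds:**" = true
    all_goals simp at h2
    · simp [pvStepA, pvEntStep, pvItems, h, h1, h2,
        PySem.Dict.modify, PySem.Dict.getD_insert_self, PySem.Dict.insert_insert_self]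
    · simp [pvStepA, pvEntStep, h, h1, h2]

lemma ent_concat (body : List String) (raw : String) :
    pvEnt (body ++ [raw]) = pvEntStep (pvEnt body) raw := by
  simp [pvEnt]

-- the dict after flushing the pending section
lemma flush_eq (cur : Option (String × List String)) (d : PD1) :
    (pvStA cur d).1 = (pvOpt cur).foldl pvStepB d := by
  cases cur with
  | none => rfl
  | some sec =>
    simp only [pvStA, pvOpt, List.foldl_cons, List.foldl_nil, stepB_char]
    split_ifs <;> rfl

-- main invariant: running A's loop from the state of a pending section computes
-- B's second pass over the sections B's first pass would still emit
lemma main_inv (lines : List String) : ∀ cur (d : PD1),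
    (lines.foldl pvStepA (pvStA cur d)).1 = (pvSecs cur lines).foldl pvStepB d := by
  induction lines with
  | nil => intro cur d; simpa [pvSecs] using (flush_eq cur d)
  | cons raw rest ih =>
    intro cur d
    rw [List.foldl_cons]
    cases h : pvHdr raw with
    | true =>
      have hstep : pvStepA (pvStA cur d) raw
          = pvStA (some (raw, [])) ((pvOpt cur).foldl pvStepB d) := by
        have h1 : pvStepA (pvStA cur d) raw = pvStepA ((pvStA cur d).1, (pvStA cur d).2) raw := rfl
        rw [h1, stepA_hdr _ _ _ h, flush_eq]
        simp only [pvStA, pvEnt, List.foldl_nil]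
      rw [hstep, secs_hdr _ _ _ h, List.foldl_append, ← flush_eq]
      exact ih (some (raw, [])) _
    | false =>
      cases cur with
      | none =>
        have h0 : pvStA none d = (d, none) := rfl
        rw [h0, stepA_none _ _ h, secs_none _ _ h, ← h0]
        exact ih none d
      | some sec =>
        rw [secs_body _ _ _ h]
        by_cases hb : pvBad (pvTag sec.1)
        · have h1 : pvStA (some sec) d = (d, none) := by simp [pvStA, hb]
          have h2 : pvStA (some (sec.1, sec.2 ++ [raw])) d = (d, none) := by simp [pvStA, hb]
          rw [h1, stepA_none _ _ h, ← h2]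
          exact ih _ d
        · have h1 : pvStA (some sec) d
              = (d.insert (pvTag sec.1) (pvEnt sec.2), some (pvTag sec.1)) := by
            simp [pvStA, hb]
          have h2 : pvStA (some (sec.1, sec.2 ++ [raw])) d
              = (d.insert (pvTag sec.1) (pvEnt (sec.2 ++ [raw])), some (pvTag sec.1)) := by
            simp [pvStA, hb]
          rw [h1, stepA_body _ _ _ _ h, ← ent_concat, ← h2]
          exact ih _ d

-- ===== VERDICT (by name: the statement is the Claim_ definition above) =====
theorem parse_narratives_py_spec : Claim_equal_parse_narratives_py := by
  intro text _
  show parse_narratives_py text = parse_narratives_py_alt text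
  unfold parse_narratives_py parse_narratives_py_alt
  rw [sections_eq]
  have h := main_inv (PySem.Str.splitlines text) none PySem.Dict.empty
  have h0 : pvStA none PySem.Dict.empty = (PySem.Dict.empty, none) := rfl
  rw [h0] at h
  rw [h]
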